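-- pv_equiv track=rewrite | github.com/WebucatorTraining/classfiles-actionable-python | exception-handling/Demos/bidict_with_exception.py | bidict
-- ===== SOURCE A (Python) =====
-- def bidict(d):
--     d2 = d.copy()
--     for k, v in d.items():
--         if v in d2.keys():
--             raise KeyError('Cannot create bidirectional dict ' +
--                            'with duplicate keys.')
--         d2[v] = k
--     return d2
-- ===== SOURCE B (Python) =====
-- def bidict(d):
--     vals = list(d.values())
--     if len(set(vals)) != len(vals) or set(vals) & set(d):
--         raise KeyError('Cannot create bidirectional dict ' +
--                        'with duplicate keys.')
--     d2 = dict(d)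
--     d2.update((v, k) for k, v in d.items())
--     return d2
-- ===== Notes on version B (the rewrite author's own statement) =====
-- stated objective: simpler
-- what changed: replaces the interleaved membership-check-and-insert loop by an up-front set-based collision test (duplicate values, or a value colliding with a key) followed by a plain unconditional build pass
import Mathlib
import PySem

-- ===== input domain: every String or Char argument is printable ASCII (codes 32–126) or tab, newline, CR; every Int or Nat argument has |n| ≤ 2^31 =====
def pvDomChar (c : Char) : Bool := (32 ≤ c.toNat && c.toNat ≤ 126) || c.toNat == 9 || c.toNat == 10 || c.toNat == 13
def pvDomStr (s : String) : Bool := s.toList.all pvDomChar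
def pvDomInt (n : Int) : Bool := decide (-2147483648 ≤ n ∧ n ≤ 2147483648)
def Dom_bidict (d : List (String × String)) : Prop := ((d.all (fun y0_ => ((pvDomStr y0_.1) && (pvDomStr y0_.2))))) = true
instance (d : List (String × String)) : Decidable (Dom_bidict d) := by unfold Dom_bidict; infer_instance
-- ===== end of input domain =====

-- B replaces A's interleaved membership-check-and-insert loop by an up-front set-based
-- collision test followed by a plain unconditional build pass (objective: simpler).

-- ===== PORT A =====
-- the for-loop of A: d2 grows while the items are scanned; none = KeyError
def bidictLoopA (items : List (String × String)) (d2 : PySem.Dict String String) :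
    Option (PySem.Dict String String) :=
  match items with
  | [] => some d2
  | (k, v) :: rest =>
      if d2.contains v then none
      else bidictLoopA rest (d2.insert v k)

def bidict (d : List (String × String)) : List (String × String) :=
  ((bidictLoopA d (PySem.Dict.mk d)).getD (PySem.Dict.mk [])).items

-- ===== PORT B =====
def bidict_alt (d : List (String × String)) : List (String × String) :=
  let vals := d.map Prod.snd
  if (PySem.Set.ofList vals).length ≠ vals.length ∨
     PySem.Set.inter (PySem.Set.ofList vals) (PySem.Set.ofList (d.map Prod.fst)) ≠ [] then
    []  -- raise KeyError (excluded by Pre_)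
  else
    ((PySem.Dict.mk d).update (d.map (fun p => (p.2, p.1)))).items

-- ===== PRECONDITION & SPEC =====
-- Pre_ excludes (a) association lists with duplicate keys, which do not represent a Python
-- dict, and (b) inputs where A raises KeyError: a duplicate value, or a value equal to a key.
def Pre_bidict (d : List (String × String)) : Prop :=
  (d.map Prod.fst).Nodup ∧ (d.map Prod.snd).Nodup ∧
  ∀ p ∈ d, p.2 ∉ d.map Prod.fst
instance (d : List (String × String)) : Decidable (Pre_bidict d) := by
  unfold Pre_bidict; infer_instance

def pvWitness_bidict : (List (String × String)) := [("a", "b"), ("c", "d")]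

def Spec_bidict (d : List (String × String)) (out : List (String × String)) : Prop := out = bidict_alt d
instance (d : List (String × String)) (out : List (String × String)) : Decidable (Spec_bidict d out) := by unfold Spec_bidict; infer_instance

-- ===== CLAIM (what is proved, stated in full; the proofs are below) =====
def Claim_equal_bidict : Prop := ∀ (d : List (String × String)), Dom_bidict d → Pre_bidict d → Spec_bidict d (bidict d)

-- ===== LEMMAS AND PROOFS =====

-- A's loop, when no item's value collides with the accumulator's keys and the values are
-- distinct, never raises and equals the unconditional build fold.
theorem bidictLoopA_eq_foldl (items : List (String × String))
    (d2 : PySem.Dict String String)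
    (hvals : (items.map Prod.snd).Nodup)
    (hfresh : ∀ p ∈ items, d2.contains p.2 = false) :
    bidictLoopA items d2 = some (items.foldl (fun d2 p => d2.insert p.2 p.1) d2) := by
  induction items generalizing d2 with
  | nil => rfl
  | cons hd tl ih =>
      obtain ⟨k, v⟩ := hd
      have hv : d2.contains v = false := hfresh (k, v) (List.mem_cons_self)
      have hvals' : (v :: tl.map Prod.snd).Nodup := by simpa using hvals
      simp only [bidictLoopA, hv, if_neg Bool.false_ne_true, List.foldl_cons]
      refine ih _ ?_ ?_
      · exact (List.nodup_cons.mp hvals').2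
      · intro p hp
        have hne : p.2 ≠ v := by
          have hmem : p.2 ∈ tl.map Prod.snd := List.mem_map_of_mem hp
          intro h; exact (List.nodup_cons.mp hvals').1 (h ▸ hmem)
        rw [PySem.Dict.contains_insert]
        simp [hne, hfresh p (List.mem_cons_of_mem _ hp)]

-- ===== VERDICT (by name: the statement is the Claim_ definition above) =====
theorem bidict_spec : Claim_equal_bidict := by
  intro d _ hpre
  obtain ⟨hkeys, hvals, hdisj⟩ := hpre
  unfold Spec_bidict bidict bidict_alt
  have hfresh : ∀ p ∈ d, (PySem.Dict.mk d).contains p.2 = false := by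
    intro p hp
    have : p.2 ∉ (PySem.Dict.mk d).keys := by
      simpa [PySem.Dict.keys] using hdisj p hp
    simpa [PySem.Dict.contains_eq_decide_mem_keys] using this
  rw [bidictLoopA_eq_foldl d (PySem.Dict.mk d) hvals hfresh]
  have hset : PySem.Set.ofList (d.map Prod.snd) = d.map Prod.snd :=
    PySem.Set.ofList_eq_self_of_nodup _ hvals
  have hinter : PySem.Set.inter (PySem.Set.ofList (d.map Prod.snd))
      (PySem.Set.ofList (d.map Prod.fst)) = [] := by
    rw [List.eq_nil_iff_forall_not_mem]
    intro x hx
    have hx' := (PySem.Set.mem_inter _ _ _).mp hx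
    obtain ⟨p, hp, hpx⟩ := List.mem_map.mp ((PySem.Set.mem_ofList _ _).mp hx'.1)
    exact hdisj p hp (hpx ▸ (PySem.Set.mem_ofList _ _).mp hx'.2)
  have hupd : (PySem.Dict.mk d).update (d.map (fun p => (p.2, p.1)))
      = d.foldl (fun d2 p => d2.insert p.2 p.1) (PySem.Dict.mk d) := by
    show (d.map (fun p => (p.2, p.1))).foldl (fun d2 p => d2.insert p.1 p.2) (PySem.Dict.mk d) = _
    rw [List.foldl_map]
  have hinter2 : PySem.Set.inter (d.map Prod.snd) (PySem.Set.ofList (d.map Prod.fst)) = [] :=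
    hset ▸ hinter
  simp [hset, hinter2, hupd]
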